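-- pv_equiv track=rewrite | github.com/aldotb/Algebra-Math-Symbolic-Biblie | Libaldo/lib_atbiter.py | check_only
-- ===== SOURCE A (Python) =====
-- def check_only(mexpr, sexpr):
--     cc = 0
--     qq = len(sexpr)
--     for i in range(len(mexpr)):
--         if sexpr == mexpr[i:i + qq]:
--             cc += 1
--             if cc > 1:
--                 return False
--     if cc == 0:
--         return False
--     return True
-- ===== SOURCE B (Python) =====
-- def check_only(mexpr, sexpr):
--     first = mexpr.find(sexpr)
--     if first == -1:
--         return False
--     return first == mexpr.rfind(sexpr)
-- ===== Notes on version B (the rewrite author's own statement) =====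
-- stated objective: alternative
-- what changed: Replaces A's counting loop (slice-compare at every index, early return at the second hit) by a characterization of uniqueness: the pattern occurs exactly once iff its leftmost occurrence (find) and its rightmost occurrence (rfind) coincide, computed by two C-level scans from opposite ends with no counter.
-- outside the precondition, e.g. on check_only('a', ''): A returns True, B returns False; on check_only('', ''): A returns False, B returns True
import Mathlib
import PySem

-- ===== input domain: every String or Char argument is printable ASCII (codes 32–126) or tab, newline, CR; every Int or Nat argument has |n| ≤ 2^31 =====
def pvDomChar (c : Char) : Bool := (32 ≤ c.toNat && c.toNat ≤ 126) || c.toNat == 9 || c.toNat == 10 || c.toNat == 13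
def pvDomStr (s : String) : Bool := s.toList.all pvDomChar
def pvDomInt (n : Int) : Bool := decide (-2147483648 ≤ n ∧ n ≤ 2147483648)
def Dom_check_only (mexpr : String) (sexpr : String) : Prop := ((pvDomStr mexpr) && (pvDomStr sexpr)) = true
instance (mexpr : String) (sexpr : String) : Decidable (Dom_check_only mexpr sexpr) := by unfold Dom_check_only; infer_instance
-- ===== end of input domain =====

-- B drops A's occurrence-counting loop: the pattern occurs exactly once iff its leftmost
-- occurrence (find) coincides with its rightmost occurrence (rfind).

-- ===== PORT A =====
-- the for-loop with running counter cc and the early 'return False' at the second match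
def check_only_go (m s : List Char) (qq : Nat) (i cc : Nat) : Bool :=
  if i < m.length then
    if s = PySem.List.slice m (some (i : Int)) (some ((i : Int) + (qq : Int))) then
      if cc + 1 > 1 then false
      else check_only_go m s qq (i + 1) (cc + 1)
    else check_only_go m s qq (i + 1) cc
  else if cc = 0 then false else true
termination_by m.length - i

def check_only (mexpr : String) (sexpr : String) : Bool :=
  check_only_go mexpr.toList sexpr.toList sexpr.toList.length 0 0

-- ===== PORT B =====
def check_only_alt (mexpr : String) (sexpr : String) : Bool :=
  let first := PySem.Str.find mexpr sexpr
  if first = -1 then false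
  else decide (first = PySem.Str.rfind mexpr sexpr)

-- ===== PRECONDITION & SPEC =====
-- Pre_ excludes only the empty pattern on texts of length ≤ 1, the one corner where A's
-- accidental convention (True iff len(mexpr)==1) and B's (True iff mexpr=='') disagree.
def Pre_check_only (mexpr : String) (sexpr : String) : Prop := sexpr ≠ "" ∨ 2 ≤ mexpr.length
instance (mexpr : String) (sexpr : String) : Decidable (Pre_check_only mexpr sexpr) := by unfold Pre_check_only; infer_instance
def pvWitness_check_only : String × String := ("abca", "b")

def Spec_check_only (mexpr : String) (sexpr : String) (out : Bool) : Prop := out = check_only_alt mexpr sexpr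
instance (mexpr : String) (sexpr : String) (out : Bool) : Decidable (Spec_check_only mexpr sexpr out) := by unfold Spec_check_only; infer_instance

-- ===== CLAIM (what is proved, stated in full; the proofs are below) =====
def Claim_equal_check_only : Prop := ∀ (mexpr : String) (sexpr : String), Dom_check_only mexpr sexpr → Pre_check_only mexpr sexpr → Spec_check_only mexpr sexpr (check_only mexpr sexpr)

-- ===== LEMMAS AND PROOFS =====

-- number of match positions in [i, m.length)
def matchCount (m s : List Char) (i : Nat) : Nat :=
  (List.range' i (m.length - i)).countP (fun j => decide (s <+: m.drop j))

theorem matchCount_ge (m s : List Char) (i : Nat) (h : i ≥ m.length) :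
    matchCount m s i = 0 := by
  unfold matchCount
  have : m.length - i = 0 := by omega
  simp [this]

theorem matchCount_succ (m s : List Char) (i : Nat) (h : i < m.length) :
    matchCount m s i = (if s <+: m.drop i then 1 else 0) + matchCount m s (i + 1) := by
  unfold matchCount
  have h1 : m.length - i = 1 + (m.length - (i + 1)) := by omega
  rw [h1]
  have h2 : 1 + (m.length - (i + 1)) = (m.length - (i + 1)) + 1 := by omega
  rw [h2, List.range'_succ, List.countP_cons]
  by_cases hp : s <+: m.drop i <;> simp [hp, Nat.add_comm]

theorem matchCount_shift (m s : List Char) (f : Nat) (hf : f ≤ m.length)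
    (hb : ∀ j < f, ¬ s <+: m.drop j) : matchCount m s 0 = matchCount m s f := by
  unfold matchCount
  rw [show m.length - 0 = f + (m.length - f) by omega, ← List.range'_append, List.countP_append]
  have h0 : (List.range' 0 f).countP (fun j => decide (s <+: m.drop j)) = 0 := by
    rw [List.countP_eq_zero]
    intro a ha
    have := List.mem_range'_1.mp ha
    simpa using hb a (by omega)
  simp [h0]

theorem matchCount_eq_zero_iff (m s : List Char) (hs : s ≠ []) (i : Nat) :
    matchCount m s i = 0 ↔ ∀ j, i ≤ j → ¬ s <+: m.drop j := by
  unfold matchCount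
  rw [List.countP_eq_zero]
  constructor
  · intro h j hij hp
    have hsl : 0 < s.length := List.length_pos_of_ne_nil hs
    have hle := hp.length_le
    have hjlen : j < m.length := by simp [List.length_drop] at hle; omega
    have := h j (List.mem_range'_1.mpr ⟨hij, by omega⟩)
    simp [hp] at this
  · intro h j hj
    have := List.mem_range'_1.mp hj
    simp [h j this.1]

theorem go_eq_count (m s : List Char) (i cc : Nat) (hcc : cc ≤ 1) :
    check_only_go m s s.length i cc = decide (cc + matchCount m s i = 1) := by
  generalize hk : m.length - i = k
  induction k generalizing i cc with
  | zero =>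
    have h : ¬ i < m.length := by omega
    rw [check_only_go]
    simp only [h, if_false]
    rw [matchCount_ge m s i (by omega)]
    interval_cases cc <;> simp
  | succ k ih =>
    have h : i < m.length := by omega
    rw [check_only_go]
    simp only [h, if_true, PySem.List.slice_natCast_add]
    by_cases hp : s <+: m.drop i
    · rw [if_pos (List.prefix_iff_eq_take.mp hp), matchCount_succ m s i h, if_pos hp]
      interval_cases cc
      · rw [if_neg (by omega), ih (i + 1) 1 (le_refl 1) (by omega)]
        simp
      · rw [if_pos (by omega)]
        simp
    · rw [if_neg (fun hse => hp (List.prefix_iff_eq_take.mpr hse)),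
          matchCount_succ m s i h, if_neg hp, ih (i + 1) cc hcc (by omega)]
      simp

-- rfind.go s sub j returns the largest i ≤ j with sub a prefix of s.drop i, or -1
theorem rfind_go_spec (s sub : List Char) (j : Nat) :
    (PySem.Chars.rfind.go s sub j = -1 ∧ ∀ i ≤ j, ¬ sub <+: s.drop i) ∨
    (∃ r : Nat, PySem.Chars.rfind.go s sub j = (r : Int) ∧ r ≤ j ∧ sub <+: s.drop r ∧
      ∀ i, r < i → i ≤ j → ¬ sub <+: s.drop i) := by
  induction j with
  | zero =>
    by_cases hp : sub <+: s
    · right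
      exact ⟨0, by simp [PySem.Chars.rfind.go, List.isPrefixOf_iff_prefix, hp],
        le_refl 0, by simpa using hp, by omega⟩
    · left
      refine ⟨by simp [PySem.Chars.rfind.go, List.isPrefixOf_iff_prefix, hp], ?_⟩
      intro i hi
      interval_cases i
      simpa using hp
  | succ j ih =>
    by_cases hp : sub <+: s.drop (j + 1)
    · right
      exact ⟨j + 1, by simp [PySem.Chars.rfind.go, List.isPrefixOf_iff_prefix, hp],
        le_refl _, hp, by omega⟩
    · have hgo : PySem.Chars.rfind.go s sub (j + 1) = PySem.Chars.rfind.go s sub j := by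
        simp [PySem.Chars.rfind.go, List.isPrefixOf_iff_prefix, hp]
      rcases ih with ⟨h1, h2⟩ | ⟨r, h1, h2, h3, h4⟩
      · left
        refine ⟨hgo.trans h1, ?_⟩
        intro i hi
        rcases Nat.lt_or_ge i (j + 1) with hlt | hge
        · exact h2 i (by omega)
        · have : i = j + 1 := by omega
          subst this; exact hp
      · right
        refine ⟨r, hgo.trans h1, by omega, h3, ?_⟩
        intro i hri hij
        rcases Nat.lt_or_ge i (j + 1) with hlt | hge
        · exact h4 i hri (by omega)
        · have : i = j + 1 := by omega
          subst this; exact hp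

theorem alt_eq_count (mexpr sexpr : String) (hs : sexpr ≠ "") :
    check_only_alt mexpr sexpr = decide (matchCount mexpr.toList sexpr.toList 0 = 1) := by
  have hs' : sexpr.toList ≠ [] := by
    intro h
    exact hs (String.toList_eq_nil_iff.mp h)
  unfold check_only_alt
  simp only [PySem.Str.find_eq, PySem.Str.rfind_eq]
  by_cases hf : PySem.Chars.find mexpr.toList sexpr.toList = -1
  · have hninf := (PySem.Chars.find_eq_neg_one_iff _ _).mp hf
    have hz : matchCount mexpr.toList sexpr.toList 0 = 0 := by
      rw [matchCount_eq_zero_iff _ _ hs' 0]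
      intro j _ hp
      exact hninf ((PySem.Chars.isIn_iff_infix _ _).mp
        ((PySem.Chars.exists_prefix_drop_iff_isIn _ _).mp ⟨j, hp⟩))
    simp [hf, hz]
  · have hf0 : 0 ≤ PySem.Chars.find mexpr.toList sexpr.toList := by
      have := PySem.Chars.neg_one_le_find mexpr.toList sexpr.toList
      omega
    obtain ⟨hmatch, hbefore⟩ := PySem.Chars.find_spec hf0
    set ft := (PySem.Chars.find mexpr.toList sexpr.toList).toNat with hft
    have hftlen : ft < mexpr.toList.length := by
      have hsl : 0 < sexpr.toList.length := List.length_pos_of_ne_nil hs'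
      have := hmatch.length_le
      rw [List.length_drop] at this
      omega
    have hfv : PySem.Chars.find mexpr.toList sexpr.toList = (ft : Int) := by omega
    rw [if_neg hf, decide_eq_decide]
    -- the count is 1 + (# matches past ft)
    have hshift : matchCount mexpr.toList sexpr.toList 0 =
        1 + matchCount mexpr.toList sexpr.toList (ft + 1) := by
      rw [matchCount_shift mexpr.toList sexpr.toList ft (by omega) hbefore,
          matchCount_succ _ _ _ hftlen, if_pos hmatch]
    rcases rfind_go_spec mexpr.toList sexpr.toList mexpr.toList.length with
      ⟨_, h2⟩ | ⟨r, h1, _, h3, h4⟩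
    · exact absurd hmatch (h2 ft (by omega))
    · -- rfind returns r, the last match; find = rfind iff no match after ft
      unfold PySem.Chars.rfind
      rw [h1, hfv, hshift]
      have hrge : ft ≤ r := by
        by_contra hlt
        exact hbefore r (by omega) h3
    -- a match position is < length when sub ≠ []
      have hrlen : r < mexpr.toList.length := by
        have hsl : 0 < sexpr.toList.length := List.length_pos_of_ne_nil hs'
        have := h3.length_le
        rw [List.length_drop] at this
        omega
      constructor
      · intro heq
        have hfr : ft = r := by exact_mod_cast heq
        have hz : matchCount mexpr.toList sexpr.toList (ft + 1) = 0 := by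
          rw [matchCount_eq_zero_iff _ _ hs' (ft + 1)]
          intro j hj hp
          have hjlen : j < mexpr.toList.length := by
            have hsl : 0 < sexpr.toList.length := List.length_pos_of_ne_nil hs'
            have := hp.length_le
            rw [List.length_drop] at this
            omega
          exact h4 j (by omega) (by omega) hp
        omega
      · intro hcount
        have hz : matchCount mexpr.toList sexpr.toList (ft + 1) = 0 := by omega
        rw [matchCount_eq_zero_iff _ _ hs' (ft + 1)] at hz
        have : r ≤ ft := by
          by_contra hgt
          exact hz r (by omega) h3
        have : ft = r := by omega
        exact_mod_cast congrArg (fun n : Nat => (n : Int)) this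

theorem go_empty (m : List Char) (h : 2 ≤ m.length) :
    check_only_go m [] 0 0 0 = false := by
  have h0 : ∀ i : Nat, ([] : List Char) = PySem.List.slice m (some (i : Int)) (some ((i : Int) + ((0 : Nat) : Int))) := by
    intro i
    rw [PySem.List.slice_natCast_add]
    simp
  rw [check_only_go, if_pos (by omega), if_pos (h0 0), if_neg (by omega),
      check_only_go, if_pos (by omega), if_pos (h0 1), if_pos (by omega)]

theorem rfind_go_nil (s : List Char) (j : Nat) :
    PySem.Chars.rfind.go s [] j = (j : Int) := by
  cases j <;> simp [PySem.Chars.rfind.go]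

theorem alt_empty (mexpr : String) (h : 2 ≤ mexpr.toList.length) :
    check_only_alt mexpr "" = false := by
  unfold check_only_alt
  simp only [PySem.Str.find_eq, PySem.Str.rfind_eq,
    show ("" : String).toList = [] from rfl, PySem.Chars.find_nil]
  unfold PySem.Chars.rfind
  rw [rfind_go_nil]
  rw [if_neg (by omega)]
  simp only [decide_eq_false_iff_not]
  omega

-- ===== VERDICT (by name: the statement is the Claim_ definition above) =====
theorem check_only_spec : Claim_equal_check_only := by
  intro mexpr sexpr _ hpre
  unfold Spec_check_only check_only
  by_cases hs : sexpr = ""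
  · have hlen : 2 ≤ mexpr.toList.length := by
      rcases hpre with h | h
      · exact absurd hs h
      · rwa [String.length_toList]
    subst hs
    simp only [show ("" : String).toList = [] from rfl, List.length_nil]
    rw [go_empty mexpr.toList hlen, alt_empty mexpr hlen]
  · rw [go_eq_count _ _ _ _ (by omega), alt_eq_count mexpr sexpr hs]
    simp
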